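-- pv_equiv track=rewrite | github.com/katherineding/DQMC-Python-Implementation | src/dqmc_util.py | ij_pairs_list
-- ===== SOURCE A (Python) =====
-- def ij_pairs_list(Nx: int, Ny: int, dx, dy):
--     """Produce Gblock indices (ilist,jlist) for fixed hopping distance vector (site_j-site_i)
--
--     Args:
--         Nx, Ny: dimension of lattice
--         dx, dy: desired hopping direction vector
--     Out:
--         A tuple of lists (ilist, jlist) representing row and column indices
--         of N*N Gblock matrix we want to extract
--     """
--     ilist, jlist = [], []
--
--     # starting location (x,y)
--     for y in range(Ny):
--         for x in range(Nx):
--             n_init = x + Nx * y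
--             # termination location (x+dx,y+dy) periodic BC
--             pt_end = ((x + dx) % Nx, (y + dy) % Ny)
--             n_end = pt_end[0] + Nx * pt_end[1]
--             ilist.append(n_init)
--             jlist.append(n_end)
--     return ilist, jlist
-- ===== SOURCE B (Python) =====
-- def ij_pairs_list(Nx: int, Ny: int, dx, dy):
--     """Rotation-based construction: the shifted x (resp. y) coordinates, taken in
--     natural order, are just range(Nx) rotated left by dx % Nx (resp. range(Ny)
--     rotated by dy % Ny). Build those two rotated lists once by concatenating two
--     ranges, then jlist is their Cartesian product x + Nx*y; ilist = range(Nx*Ny)."""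
--     if Nx <= 0 or Ny <= 0:
--         return [], []
--     rx = dx % Nx
--     ry = dy % Ny
--     xs = list(range(rx, Nx)) + list(range(rx))
--     ys = list(range(ry, Ny)) + list(range(ry))
--     jlist = [x + Nx * y for y in ys for x in xs]
--     return list(range(Nx * Ny)), jlist
-- ===== Notes on version B (the rewrite author's own statement) =====
-- stated objective: alternative
-- what changed: Replaces per-site modular arithmetic in a nested scan with a rotation construction: the shifted coordinate sequences are precomputed once as rotated ranges (two concatenated slices, one modulo each), and jlist is their Cartesian product; ilist is the closed form range(Nx*Ny).
import Mathlib
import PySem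

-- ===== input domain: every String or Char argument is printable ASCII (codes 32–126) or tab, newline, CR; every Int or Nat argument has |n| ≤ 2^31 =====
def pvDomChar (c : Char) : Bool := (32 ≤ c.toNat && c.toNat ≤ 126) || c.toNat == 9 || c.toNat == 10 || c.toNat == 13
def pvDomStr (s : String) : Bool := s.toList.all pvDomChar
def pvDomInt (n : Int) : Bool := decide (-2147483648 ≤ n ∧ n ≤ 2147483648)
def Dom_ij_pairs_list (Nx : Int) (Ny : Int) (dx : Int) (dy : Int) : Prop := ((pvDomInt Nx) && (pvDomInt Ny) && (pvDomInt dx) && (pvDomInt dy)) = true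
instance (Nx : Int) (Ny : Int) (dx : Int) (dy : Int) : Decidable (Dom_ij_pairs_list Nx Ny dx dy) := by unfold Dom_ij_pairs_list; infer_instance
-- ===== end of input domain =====

-- B replaces A's per-site modular arithmetic inside a nested scan by a rotation
-- construction: the shifted coordinate sequences are precomputed once as rotated
-- ranges (two concatenated slices, one modulo each) and jlist is their Cartesian
-- product; ilist is the closed form range(Nx*Ny) (objective: alternative).

-- ===== PORT A =====
def ij_pairs_list (Nx : Int) (Ny : Int) (dx : Int) (dy : Int) : List Int × List Int :=
  (PySem.List.pyRange 0 Ny 1).foldl (fun acc y =>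
    (PySem.List.pyRange 0 Nx 1).foldl (fun acc2 x =>
      let n_init := x + Nx * y
      let pt_end := (PySem.Int.mod (x + dx) Nx, PySem.Int.mod (y + dy) Ny)
      let n_end := pt_end.1 + Nx * pt_end.2
      (acc2.1 ++ [n_init], acc2.2 ++ [n_end])) acc) ([], [])

-- ===== PORT B =====
def ij_pairs_list_alt (Nx : Int) (Ny : Int) (dx : Int) (dy : Int) : List Int × List Int :=
  if Nx ≤ 0 ∨ Ny ≤ 0 then ([], [])
  else
    let rx := PySem.Int.mod dx Nx
    let ry := PySem.Int.mod dy Ny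
    let xs := PySem.List.pyRange rx Nx 1 ++ PySem.List.pyRange 0 rx 1
    let ys := PySem.List.pyRange ry Ny 1 ++ PySem.List.pyRange 0 ry 1
    let jlist := ys.flatMap (fun y => xs.map (fun x => x + Nx * y))
    (PySem.List.pyRange 0 (Nx * Ny) 1, jlist)

-- ===== PRECONDITION & SPEC =====
def Spec_ij_pairs_list (Nx : Int) (Ny : Int) (dx : Int) (dy : Int) (out : List Int × List Int) : Prop := out = ij_pairs_list_alt Nx Ny dx dy
instance (Nx : Int) (Ny : Int) (dx : Int) (dy : Int) (out : List Int × List Int) : Decidable (Spec_ij_pairs_list Nx Ny dx dy out) := by unfold Spec_ij_pairs_list; infer_instance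

-- ===== CLAIM (what is proved, stated in full; the proofs are below) =====
def Claim_equal_ij_pairs_list : Prop := ∀ (Nx : Int) (Ny : Int) (dx : Int) (dy : Int), Dom_ij_pairs_list Nx Ny dx dy → Spec_ij_pairs_list Nx Ny dx dy (ij_pairs_list Nx Ny dx dy)

-- ===== LEMMAS AND PROOFS =====

-- A's inner loop over x just appends the two mapped lists.
theorem pv_inner_fold (f g : Int → Int) (xs : List Int) (acc : List Int × List Int) :
    xs.foldl (fun acc2 x => (acc2.1 ++ [f x], acc2.2 ++ [g x])) acc
      = (acc.1 ++ xs.map f, acc.2 ++ xs.map g) := by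
  induction xs generalizing acc with
  | nil => simp
  | cons x xs ih => simp [ih]

-- A's outer loop flat-maps the inner loop's output.
theorem pv_outer_fold (f g : Int → Int → Int) (xs ys : List Int) (acc : List Int × List Int) :
    ys.foldl (fun acc y =>
        xs.foldl (fun acc2 x => (acc2.1 ++ [f x y], acc2.2 ++ [g x y])) acc) acc
      = (acc.1 ++ ys.flatMap (fun y => xs.map (fun x => f x y)),
         acc.2 ++ ys.flatMap (fun y => xs.map (fun x => g x y))) := by
  induction ys generalizing acc with
  | nil => simp
  | cons y ys ih =>
    rw [List.foldl_cons, pv_inner_fold, ih]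
    simp [List.append_assoc]

theorem pv_flatMap_congr {α β : Type} (l : List α) (f g : α → List β)
    (h : ∀ a ∈ l, f a = g a) : l.flatMap f = l.flatMap g := by
  induction l with
  | nil => rfl
  | cons a l ih =>
    simp only [List.flatMap_cons]
    rw [h a (by simp), ih (fun a ha => h a (by simp [ha]))]

-- Row-major enumeration: concatenating the rows gives range(Nx*Ny), for Nat row count.
theorem pv_ilist_nat (Nx : Int) (hx : 0 < Nx) (m : Nat) :
    (PySem.List.pyRange 0 (m : Int) 1).flatMap
        (fun y => (PySem.List.pyRange 0 Nx 1).map (fun x => x + Nx * y))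
      = PySem.List.pyRange 0 (Nx * m) 1 := by
  induction m with
  | zero => simp [PySem.List.pyRange_one_eq_nil]
  | succ k ih =>
    have h1 : ((k : Int) + 1) = ((k + 1 : Nat) : Int) := by push_cast; ring
    rw [← h1, PySem.List.pyRange_one_succ_right (by positivity)]
    rw [List.flatMap_append, ih]
    have hsplit : PySem.List.pyRange 0 (Nx * ((k:Int) + 1)) 1
        = PySem.List.pyRange 0 (Nx * k) 1 ++ PySem.List.pyRange (Nx * k) (Nx * ((k:Int)+1)) 1 := by
      apply PySem.List.pyRange_one_append
      · positivity
      · nlinarith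
    rw [mul_add, mul_one] at hsplit ⊢
    rw [hsplit]
    congr 1
    simp only [List.flatMap_cons, List.flatMap_nil, List.append_nil]
    rw [PySem.List.pyRange_one (Nx * k) (Nx * k + Nx), PySem.List.pyRange_one 0 Nx]
    simp [List.map_map, Function.comp]
    intro a _
    ring

theorem pv_ilist (Nx Ny : Int) (hx : 0 < Nx) (hy : 0 < Ny) :
    (PySem.List.pyRange 0 Ny 1).flatMap
        (fun y => (PySem.List.pyRange 0 Nx 1).map (fun x => x + Nx * y))
      = PySem.List.pyRange 0 (Nx * Ny) 1 := by
  have h : Ny = ((Ny.toNat : Nat) : Int) := by omega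
  rw [h]; exact pv_ilist_nat Nx hx Ny.toNat

-- Mapping a constant shift over a range shifts its endpoints.
theorem pv_map_shift (a b c : Int) (f : Int → Int)
    (h : ∀ x, a ≤ x → x < b → f x = x + c) :
    (PySem.List.pyRange a b 1).map f = PySem.List.pyRange (a + c) (b + c) 1 := by
  rw [PySem.List.pyRange_one a b, PySem.List.pyRange_one (a + c) (b + c)]
  have he : (b + c - (a + c)) = b - a := by ring
  rw [he, List.map_map]
  apply List.map_congr_left
  intro k hk
  rw [List.mem_range] at hk
  have h1 : a ≤ a + (k : Int) := by omega
  have h2 : a + (k : Int) < b := by omega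
  simp only [Function.comp]
  rw [h _ h1 h2]; ring

-- The shifted coordinates (x+d) % N, taken for x = 0..N-1, are the rotation of range(N).
theorem pv_rot (N d : Int) (hN : 0 < N) :
    (PySem.List.pyRange 0 N 1).map (fun x => PySem.Int.mod (x + d) N)
      = PySem.List.pyRange (PySem.Int.mod d N) N 1
          ++ PySem.List.pyRange 0 (PySem.Int.mod d N) 1 := by
  have hmod : PySem.Int.mod d N = d.emod N := PySem.Int.mod_eq_emod_of_pos hN
  set r := d.emod N with hr
  have hr0 : 0 ≤ r := Int.emod_nonneg d (by omega)
  have hrN : r < N := Int.emod_lt_of_pos d hN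
  have hdecomp : ∀ x : Int, x + d = (x + r) + N * (d.ediv N) := by
    intro x
    have hd : N * d.ediv N + d.emod N = d := Int.mul_ediv_add_emod d N
    linarith
  have hsplit : PySem.List.pyRange 0 N 1
      = PySem.List.pyRange 0 (N - r) 1 ++ PySem.List.pyRange (N - r) N 1 :=
    PySem.List.pyRange_one_append 0 (N - r) N (by omega) (by omega)
  rw [hmod, hsplit, List.map_append]
  congr 1
  · -- low part: shift by r
    rw [pv_map_shift 0 (N - r) r]
    · congr 1 <;> omega
    · intro x h0 h1
      rw [PySem.Int.mod_eq_emod_of_pos hN, hdecomp x, Int.add_mul_emod_self_left]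
      exact Int.emod_eq_of_lt (by omega) (by omega)
  · -- high part: shift by r - N (wraps around)
    rw [pv_map_shift (N - r) N (r - N)]
    · congr 1 <;> omega
    · intro x h0 h1
      rw [PySem.Int.mod_eq_emod_of_pos hN, hdecomp x]
      have : (x + r) + N * d.ediv N = (x + (r - N)) + N * (d.ediv N + 1) := by ring
      rw [this, Int.add_mul_emod_self_left]
      exact Int.emod_eq_of_lt (by omega) (by omega)

-- ===== VERDICT (by name: the statement is the Claim_ definition above) =====
theorem ij_pairs_list_spec : Claim_equal_ij_pairs_list := by
  intro Nx Ny dx dy _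
  unfold Spec_ij_pairs_list ij_pairs_list ij_pairs_list_alt
  rw [pv_outer_fold (fun x y => x + Nx * y)
       (fun x y => PySem.Int.mod (x + dx) Nx + Nx * PySem.Int.mod (y + dy) Ny)]
  by_cases hdeg : Nx ≤ 0 ∨ Ny ≤ 0
  · simp only [if_pos hdeg]
    rcases hdeg with h | h
    · simp [PySem.List.pyRange_one_eq_nil h]
    · simp [PySem.List.pyRange_one_eq_nil h]
  · have hx : 0 < Nx := by omega
    have hy : 0 < Ny := by omega
    simp only [if_neg (by omega : ¬(Nx ≤ 0 ∨ Ny ≤ 0)), List.nil_append, Prod.mk.injEq]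
    refine ⟨pv_ilist Nx Ny hx hy, ?_⟩
    -- jlist: rewrite A's inner map through the x-rotation, then the outer
    -- flatMap through the y-rotation.
    have hinner : ∀ y ∈ PySem.List.pyRange 0 Ny 1,
        (PySem.List.pyRange 0 Nx 1).map
            (fun x => PySem.Int.mod (x + dx) Nx + Nx * PySem.Int.mod (y + dy) Ny)
          = ((PySem.List.pyRange 0 Nx 1).map (fun x => PySem.Int.mod (x + dx) Nx)).map
              (fun t => t + Nx * PySem.Int.mod (y + dy) Ny) := by
      intro y _; rw [List.map_map]; rfl
    rw [pv_flatMap_congr _ _ _ hinner]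
    have hflat : (PySem.List.pyRange 0 Ny 1).flatMap
          (fun y => ((PySem.List.pyRange 0 Nx 1).map (fun x => PySem.Int.mod (x + dx) Nx)).map
              (fun t => t + Nx * PySem.Int.mod (y + dy) Ny))
        = ((PySem.List.pyRange 0 Ny 1).map (fun y => PySem.Int.mod (y + dy) Ny)).flatMap
            (fun c => ((PySem.List.pyRange 0 Nx 1).map (fun x => PySem.Int.mod (x + dx) Nx)).map
              (fun t => t + Nx * c)) := by
      rw [List.flatMap_map]
    rw [hflat, pv_rot Nx dx hx, pv_rot Ny dy hy]
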